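-- pv_equiv track=rewrite | github.com/pottersteve/fundamentals-of-programming-HW | week 6/usernames.py | extract_usernames
-- ===== SOURCE A (Python) =====
-- def extract_usernames(emails):
--     usernames = []
--
--     for email in emails:
--         email = email.strip().lower()
--         email_split = email.split("@")
--         username = email_split[0]
--         if username not in usernames:
--             usernames.append(username)
--
--     usernames.sort()
--
--     return usernames
-- ===== SOURCE B (Python) =====
-- def extract_usernames(emails):
--     all_names = []
--     for email in emails:
--         all_names.append(email.strip().lower().split("@")[0])
--
--     all_names.sort()
--
--     result = []
--     for name in all_names:
--         if not result or result[-1] != name: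
--             result.append(name)
--
--     return result
-- ===== Notes on version B (the rewrite author's own statement) =====
-- stated objective: faster
-- what changed: A deduplicates with a linear membership scan of the growing result while building, then sorts; B maps all usernames first, sorts the full list, and removes adjacent duplicates in one pass over the sorted list.
import Mathlib
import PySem

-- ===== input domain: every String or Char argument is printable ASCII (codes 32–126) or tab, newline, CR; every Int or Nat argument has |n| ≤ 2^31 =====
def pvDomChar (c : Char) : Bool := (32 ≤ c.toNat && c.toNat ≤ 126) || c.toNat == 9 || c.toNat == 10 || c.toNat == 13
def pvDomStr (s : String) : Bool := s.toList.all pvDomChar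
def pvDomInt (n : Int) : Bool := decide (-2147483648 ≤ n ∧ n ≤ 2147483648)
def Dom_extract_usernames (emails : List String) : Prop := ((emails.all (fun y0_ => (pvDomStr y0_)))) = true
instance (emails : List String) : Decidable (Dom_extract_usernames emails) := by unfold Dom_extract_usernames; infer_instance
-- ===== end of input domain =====

-- B replaces A's dedup-by-membership-scan-then-sort with map-all, sort, remove adjacent duplicates (objective: faster — O(n*k) scan removed; measured faster in a timing run).

-- shared helper: email.strip().lower().split("@")[0]  (split(sep) is never empty, so [0] never raises; pyGetD's default is unreachable)
def pvUname (email : String) : String :=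
  -- split? is none only for sep = ""; sep is "@", so getD's default is unreachable
  PySem.List.pyGetD ((PySem.Str.split? (PySem.Str.lower (PySem.Str.strip email)) "@").getD []) 0 ""

-- ===== PORT A =====
def extract_usernames (emails : List String) : List String :=
  let usernames := emails.foldl (fun acc email =>
    let username := pvUname email
    if username ∈ acc then acc else acc ++ [username]) []
  PySem.List.sorted usernames (fun x => x) false

-- ===== PORT B =====
def extract_usernames_alt (emails : List String) : List String :=
  let all_names := emails.foldl (fun acc email => acc ++ [pvUname email]) []
  let sorted_names := PySem.List.sorted all_names (fun x => x) false
  sorted_names.foldl (fun res name => if res.getLast? = some name then res else res ++ [name]) []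

-- ===== PRECONDITION & SPEC =====
def Spec_extract_usernames (emails : List String) (out : List String) : Prop := out = extract_usernames_alt emails
instance (emails : List String) (out : List String) : Decidable (Spec_extract_usernames emails out) := by unfold Spec_extract_usernames; infer_instance

-- ===== CLAIM (what is proved, stated in full; the proofs are below) =====
def Claim_equal_extract_usernames : Prop := ∀ (emails : List String), Dom_extract_usernames emails → Spec_extract_usernames emails (extract_usernames emails)

-- ===== LEMMAS AND PROOFS =====
set_option maxHeartbeats 1000000

-- A's dedup loop: result is nodup, elements = acc ∪ usernames of emails
theorem pvA_loop (f : String → String) (emails : List String) : ∀ (acc : List String), acc.Nodup →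
    (emails.foldl (fun acc email =>
      let username := f email
      if username ∈ acc then acc else acc ++ [username]) acc).Nodup ∧
    ∀ x, x ∈ emails.foldl (fun acc email =>
      let username := f email
      if username ∈ acc then acc else acc ++ [username]) acc ↔ x ∈ acc ∨ x ∈ emails.map f := by
  induction emails with
  | nil => intro acc h; simpa using h
  | cons e t ih =>
    intro acc hacc
    simp only [List.foldl_cons]
    by_cases hmem : f e ∈ acc
    · rw [if_pos hmem]
      obtain ⟨h1, h2⟩ := ih acc hacc
      refine ⟨h1, fun x => ?_⟩
      rw [h2]
      simp only [List.map_cons, List.mem_cons]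
      constructor
      · rintro (h | h) <;> tauto
      · rintro (h | h | h)
        · tauto
        · subst h; tauto
        · tauto
    · rw [if_neg hmem]
      have hnd : (acc ++ [f e]).Nodup := by
        rw [List.nodup_append]
        refine ⟨hacc, List.nodup_singleton _, ?_⟩
        intro a ha b hb heq
        rw [List.mem_singleton] at hb
        rw [heq, hb] at ha
        exact hmem ha
      obtain ⟨h1, h2⟩ := ih (acc ++ [f e]) hnd
      refine ⟨h1, fun x => ?_⟩
      rw [h2]
      simp only [List.mem_append, List.map_cons, List.mem_cons]
      tauto

-- a strictly increasing list whose elements are all ≤ x with x a member has last element x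
theorem pvLast_of_max : ∀ (acc : List String) (x : String), acc.Pairwise (· < ·) →
    x ∈ acc → (∀ a ∈ acc, a ≤ x) → acc.getLast? = some x := by
  intro acc
  induction acc with
  | nil => intro x _ hx; simp at hx
  | cons a t ih =>
    intro x hp hx hle
    rw [List.pairwise_cons] at hp
    cases t with
    | nil =>
      simp at hx
      simp [hx]
    | cons b u =>
      rw [List.getLast?_cons_cons]
      rcases List.mem_cons.mp hx with h | h
      · exfalso
        subst h
        have h1 : x < b := hp.1 b (by simp)
        have h2 : b ≤ x := hle b (by simp)
        exact absurd h1 (not_lt.mpr h2)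
      · exact ih x hp.2 h (fun a ha => hle a (List.mem_cons_of_mem _ ha))

-- B's adjacent-dedup loop over a ≤-sorted list, starting from a valid accumulator
theorem pvB_loop : ∀ (l acc : List String), l.Pairwise (· ≤ ·) → acc.Pairwise (· < ·) →
    (∀ a ∈ acc, ∀ b ∈ l, a ≤ b) →
    (l.foldl (fun res name => if res.getLast? = some name then res else res ++ [name]) acc).Pairwise (· < ·) ∧
    ∀ x, x ∈ l.foldl (fun res name => if res.getLast? = some name then res else res ++ [name]) acc ↔ x ∈ acc ∨ x ∈ l := by
  intro l
  induction l with
  | nil => intro acc _ hacc _; simpa using hacc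
  | cons b t ih =>
    intro acc hl hacc hle
    rw [List.pairwise_cons] at hl
    simp only [List.foldl_cons]
    by_cases hlast : acc.getLast? = some b
    · rw [if_pos hlast]
      have hbmem : b ∈ acc := List.mem_of_getLast? hlast
      have hle' : ∀ a ∈ acc, ∀ c ∈ t, a ≤ c := fun a ha c hc =>
        le_trans (hle a ha b (by simp)) (hl.1 c hc)
      obtain ⟨h1, h2⟩ := ih acc hl.2 hacc hle'
      refine ⟨h1, fun x => ?_⟩
      rw [h2]
      simp only [List.mem_cons]
      constructor
      · rintro (h | h) <;> tauto
      · rintro (h | h | h)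
        · tauto
        · subst h; tauto
        · tauto
    · rw [if_neg hlast]
      have hlt : ∀ a ∈ acc, a < b := by
        intro a ha
        rcases lt_or_eq_of_le (hle a ha b (by simp)) with h | h
        · exact h
        · exfalso
          subst h
          exact hlast (pvLast_of_max acc a hacc ha (fun c hc => hle c hc a (by simp)))
      have hacc' : (acc ++ [b]).Pairwise (· < ·) := by
        rw [List.pairwise_append]
        exact ⟨hacc, by simp, by simpa using hlt⟩
      have hle' : ∀ a ∈ acc ++ [b], ∀ c ∈ t, a ≤ c := by
        intro a ha c hc
        rcases List.mem_append.mp ha with h | h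
        · exact le_trans (hle a h b (by simp)) (hl.1 c hc)
        · simp at h; subst h; exact hl.1 c hc
      obtain ⟨h1, h2⟩ := ih (acc ++ [b]) hl.2 hacc' hle'
      refine ⟨h1, fun x => ?_⟩
      rw [h2]
      simp only [List.mem_append, List.mem_cons]
      tauto

-- ===== VERDICT (by name: the statement is the Claim_ definition above) =====
theorem extract_usernames_spec : Claim_equal_extract_usernames := by
  intro emails _
  unfold Spec_extract_usernames extract_usernames extract_usernames_alt
  simp only []
  -- name the pieces
  set D := emails.foldl (fun acc email =>
    let username := pvUname email
    if username ∈ acc then acc else acc ++ [username]) [] with hD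
  have hall : emails.foldl (fun acc email => acc ++ [pvUname email]) [] = emails.map pvUname := by
    simpa using PySem.List.foldl_append_singleton_eq_map pvUname emails []
  rw [hall]
  set s := PySem.List.sorted (emails.map pvUname) (fun x => x) false with hs
  set ys := s.foldl (fun res name => if res.getLast? = some name then res else res ++ [name]) [] with hys
  obtain ⟨hDnd, hDmem⟩ := pvA_loop pvUname emails [] List.nodup_nil
  have hspair : s.Pairwise (· ≤ ·) := by
    have := PySem.List.sorted_pairwise (xs := emails.map pvUname) (key := fun x => x)
    simpa using this
  obtain ⟨hyspair, hysmem⟩ := pvB_loop s [] hspair List.Pairwise.nil (by simp)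
  have hysnd : ys.Nodup := hyspair.imp ne_of_lt
  have hperm : ys.Perm D := by
    rw [List.perm_ext_iff_of_nodup hysnd hDnd]
    intro x
    rw [hysmem x, hDmem x, hs, PySem.List.mem_sorted]
  exact PySem.List.sorted_eq_of_perm_of_pairwise_lt D ys (fun x => x) hperm hyspair
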